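-- pv_equiv track=rewrite | github.com/vchu22/Genomic-Data-Science-Practice | Python for Genomic Data Science/bioseq/dnautil.py | find_start_codon
-- ===== SOURCE A (Python) =====
-- def find_start_codon(dna,frame=0):
--     """find all the in-frame start codon and returns the position where it's found"""
--     positions = []
--     start_codons='atg'
--     #### Time complexity: T1(n) = O(n/3)
--     for i in range(frame,len(dna),3): # check for every 3 bases
--         codon = dna[i:i+3].lower()
--         if codon == start_codons:
--              positions.append(i)
--     return positions
-- ===== SOURCE B (Python) =====
-- def find_start_codon(dna, frame=0):
--     """find all the in-frame start codon and returns the position where it's found"""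
--     s = dna.lower()
--     positions = []
--     pos = s.find('atg')
--     while pos != -1:
--         if pos >= frame and (pos - frame) % 3 == 0:
--             positions.append(pos)
--         pos = s.find('atg', pos + 1)
--     return positions
-- ===== Notes on version B (the rewrite author's own statement) =====
-- stated objective: idiomatic
-- what changed: B lower-cases the string once and locates every start-codon occurrence with C-level str.find in a while loop (filtering by frame), instead of a Python-level loop that builds and lower-cases a fresh 3-char slice at every in-frame index.
-- outside the precondition, e.g. on find_start_codon('atgatg', -6): A returns [-6, 0, 3], B returns [0, 3]
import Mathlib
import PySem

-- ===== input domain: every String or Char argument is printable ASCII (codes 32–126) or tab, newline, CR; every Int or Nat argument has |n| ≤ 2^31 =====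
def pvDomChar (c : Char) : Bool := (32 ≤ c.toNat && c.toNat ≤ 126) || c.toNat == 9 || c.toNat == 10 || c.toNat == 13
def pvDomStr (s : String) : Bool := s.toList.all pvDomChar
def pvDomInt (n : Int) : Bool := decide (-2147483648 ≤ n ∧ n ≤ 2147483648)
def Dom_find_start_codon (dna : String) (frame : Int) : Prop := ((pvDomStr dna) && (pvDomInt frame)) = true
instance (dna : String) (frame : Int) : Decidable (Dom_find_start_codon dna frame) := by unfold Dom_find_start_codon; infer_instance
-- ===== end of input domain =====

-- B lower-cases the string once and collects every start-codon occurrence with a find loop,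
-- filtering by frame, instead of stepping codon-by-codon over in-frame slices (idiomatic rewrite).


-- ===== PORT A =====
def find_start_codon (dna : String) (frame : Int) : List Int :=
  let start_codons := "atg"
  (PySem.List.pyRange frame (PySem.Str.len dna) 3).foldl
    (fun positions i =>
      let codon := PySem.Str.lower (PySem.Str.slice dna (some i) (some (i + 3)))
      if codon = start_codons then positions ++ [i] else positions) []

-- ===== PORT B =====
-- the while loop of Source B; fuel only makes the recursion structural (it never runs out:
-- the search start strictly increases and is bounded by the string length)
def fscLoop (s : List Char) (frame : Int) : Nat → Int → List Int → List Int
  | 0, _, positions => positions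
  | fuel + 1, pos, positions =>
    if pos = -1 then positions
    else
      let positions' :=
        if frame ≤ pos ∧ PySem.Int.mod (pos - frame) 3 = 0 then positions ++ [pos] else positions
      fscLoop s frame fuel (PySem.Chars.findFrom s "atg".toList (pos + 1)) positions'

def find_start_codon_alt (dna : String) (frame : Int) : List Int :=
  let s := (PySem.Str.lower dna).toList
  fscLoop s frame (s.length + 1) (PySem.Chars.find s "atg".toList) []

-- ===== PRECONDITION & SPEC =====
-- Pre_ restricts to the natural domain of a reading frame (a nonnegative offset): it excludes
-- negative frame, on which A's negative slice indices wrap around the end of the string so that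
-- A can report negative offsets, while B reports only genuine occurrence indices.
def Pre_find_start_codon (dna : String) (frame : Int) : Prop := 0 ≤ frame
instance (dna : String) (frame : Int) : Decidable (Pre_find_start_codon dna frame) := by
  unfold Pre_find_start_codon; infer_instance

def pvWitness_find_start_codon : String × Int := ("ATGxatgatg", 1)

def Spec_find_start_codon (dna : String) (frame : Int) (out : List Int) : Prop :=
  out = find_start_codon_alt dna frame
instance (dna : String) (frame : Int) (out : List Int) : Decidable (Spec_find_start_codon dna frame out) := by
  unfold Spec_find_start_codon; infer_instance

-- ===== CLAIM (what is proved, stated in full; the proofs are below) =====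
def Claim_equal_find_start_codon : Prop :=
  ∀ (dna : String) (frame : Int), Dom_find_start_codon dna frame →
    Pre_find_start_codon dna frame →
    Spec_find_start_codon dna frame (find_start_codon dna frame)

-- ===== LEMMAS AND PROOFS =====

-- all positions ≥ k at which 'atg' occurs in s (increasing order)
def occFrom (s : List Char) (k : Nat) : List Nat :=
  (List.range s.length).filter (fun j => decide (k ≤ j ∧ "atg".toList <+: s.drop j))

theorem eq_of_pairwise_lt_of_mem_iff {α : Type} [LinearOrder α] :
    ∀ (l1 l2 : List α), l1.Pairwise (· < ·) → l2.Pairwise (· < ·) →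
      (∀ x, x ∈ l1 ↔ x ∈ l2) → l1 = l2 := by
  intro l1
  induction l1 with
  | nil =>
    intro l2 _ _ h
    cases l2 with
    | nil => rfl
    | cons b u => exact absurd ((h b).2 (by simp)) (by simp)
  | cons a t ih =>
    intro l2 h1 h2 h
    cases l2 with
    | nil => exact absurd ((h a).1 (by simp)) (by simp)
    | cons b u =>
      have ht := List.pairwise_cons.1 h1
      have hu := List.pairwise_cons.1 h2
      have hab : a = b := by
        rcases List.mem_cons.1 ((h a).1 (by simp)) with heq | hau
        · exact heq
        · have hba : b < a := hu.1 a hau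
          rcases List.mem_cons.1 ((h b).2 (by simp)) with heq | hbt
          · exact heq.symm
          · exact absurd (ht.1 b hbt) (fun hlt => lt_asymm hlt hba)
      subst hab
      have : t = u := by
        apply ih u ht.2 hu.2
        intro x
        constructor
        · intro hx
          rcases List.mem_cons.1 ((h x).1 (List.mem_cons_of_mem _ hx)) with heq | hxu
          · exact absurd (heq ▸ ht.1 x hx) (lt_irrefl a)
          · exact hxu
        · intro hx
          rcases List.mem_cons.1 ((h x).2 (List.mem_cons_of_mem _ hx)) with heq | hxt
          · exact absurd (heq ▸ hu.1 x hx) (lt_irrefl a)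
          · exact hxt
      rw [this]

theorem mem_occFrom (s : List Char) (k : Nat) (x : Nat) :
    x ∈ occFrom s k ↔ x < s.length ∧ k ≤ x ∧ "atg".toList <+: s.drop x := by
  simp [occFrom]

theorem pairwise_occFrom (s : List Char) (k : Nat) : (occFrom s k).Pairwise (· < ·) :=
  (List.pairwise_lt_range).filter _

theorem occFrom_eq_nil (s : List Char) (k : Nat)
    (h : ¬ "atg".toList <:+: s.drop k) : occFrom s k = [] := by
  rw [List.eq_nil_iff_forall_not_mem]
  intro x hx
  rcases (mem_occFrom s k x).1 hx with ⟨_, hkx, hpfx⟩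
  apply h
  have hsuf : s.drop x <:+ s.drop k := by
    have : s.drop x = (s.drop k).drop (x - k) := by
      rw [List.drop_drop]; congr 1; omega
    rw [this]; exact List.drop_suffix _ _
  exact hpfx.isInfix.trans hsuf.isInfix

theorem occFrom_cons (s : List Char) (k p : Nat)
    (hkp : k ≤ p) (hpfx : "atg".toList <+: s.drop p)
    (hmin : ∀ j, k ≤ j → j < p → ¬ "atg".toList <+: s.drop j) :
    occFrom s k = p :: occFrom s (p + 1) := by
  have hplen : p + 3 ≤ s.length := by
    have := hpfx.length_le
    simp at this; omega
  apply eq_of_pairwise_lt_of_mem_iff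
  · exact pairwise_occFrom s k
  · refine List.pairwise_cons.2 ⟨?_, pairwise_occFrom s (p+1)⟩
    intro x hx
    rcases (mem_occFrom s (p+1) x).1 hx with ⟨_, h1, _⟩; omega
  · intro x
    rw [mem_occFrom, List.mem_cons, mem_occFrom]
    constructor
    · rintro ⟨hxn, hkx, hx⟩
      rcases lt_trichotomy x p with hlt | rfl | hgt
      · exact absurd hx (hmin x hkx hlt)
      · exact Or.inl rfl
      · exact Or.inr ⟨hxn, by omega, hx⟩
    · rintro (rfl | ⟨hxn, hpx, hx⟩)
      · exact ⟨by omega, hkp, hpfx⟩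
      · exact ⟨hxn, by omega, hx⟩

-- B's loop, run from search start k, appends exactly the filtered occurrences ≥ k
theorem fscLoop_spec (s : List Char) (frame : Int) :
    ∀ (fuel k : Nat) (acc : List Int), k ≤ s.length → s.length - k < fuel →
      fscLoop s frame fuel (PySem.Chars.findFrom s "atg".toList (k : Int)) acc
        = acc ++ ((occFrom s k).filter
            (fun (j : Nat) => decide (frame ≤ (j : Int) ∧ PySem.Int.mod ((j : Int) - frame) 3 = 0))).map
            (fun (j : Nat) => (j : Int)) := by
  intro fuel
  induction fuel with
  | zero => intro k acc hk hf; omega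
  | succ f ih =>
    intro k acc hk hf
    by_cases hneg : PySem.Chars.findFrom s "atg".toList (k : Int) = -1
    · rw [hneg]
      have := (PySem.Chars.findFrom_natCast_eq_neg_one_iff s "atg".toList k hk).1 hneg
      rw [occFrom_eq_nil s k this]
      simp [fscLoop]
    · obtain ⟨hkle, hpfx, hmin⟩ := PySem.Chars.findFrom_natCast_spec s "atg".toList k hk hneg
      set q : Int := PySem.Chars.findFrom s "atg".toList (k : Int) with hq
      have hq0 : 0 ≤ q := le_trans (Int.natCast_nonneg k) hkle
      set p : Nat := q.toNat with hp
      have hqp : q = (p : Int) := by omega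
      have hplen : p + 3 ≤ s.length := by
        have := hpfx.length_le
        simp at this; omega
      have hkp : k ≤ p := by omega
      rw [occFrom_cons s k p hkp hpfx hmin]
      have hstep : fscLoop s frame (f + 1) q acc
          = fscLoop s frame f (PySem.Chars.findFrom s "atg".toList (q + 1))
              (if frame ≤ q ∧ PySem.Int.mod (q - frame) 3 = 0 then acc ++ [q] else acc) := by
        rw [fscLoop]
        simp only [if_neg hneg]
      rw [hstep]
      have hq1 : q + 1 = ((p + 1 : Nat) : Int) := by omega
      rw [hq1, ih (p + 1) _ (by omega) (by omega)]
      by_cases hcond : frame ≤ q ∧ PySem.Int.mod (q - frame) 3 = 0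
      · rw [if_pos hcond]
        have hdvd : 3 ∣ q - frame := (PySem.Int.mod_eq_zero_iff_dvd _ _).1 hcond.2
        simp only [List.filter_cons]
        rw [if_pos (by rw [← hqp]; simp [PySem.Int.mod_eq_zero_iff_dvd]; exact ⟨hcond.1, hdvd⟩)]
        simp [← hqp]
      · rw [if_neg hcond]
        simp only [List.filter_cons]
        rw [if_neg (by rw [← hqp]; simpa using hcond)]

-- A's codon test at a nonnegative index, restated as a prefix fact about the lowered string
theorem codon_iff (dna : String) (x : Int) (hx : 0 ≤ x) :
    (PySem.Str.lower (PySem.Str.slice dna (some x) (some (x + 3))) = "atg")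
      ↔ "atg".toList <+: ((PySem.Str.lower dna).toList.drop x.toNat) := by
  rw [← String.toList_inj, PySem.Str.toList_lower, PySem.Str.toList_slice,
    PySem.Chars.slice_eq_listSlice, PySem.List.slice_toNat _ hx (by omega),
    show (x + 3).toNat - x.toNat = 3 by omega, PySem.Str.toList_lower]
  simp only [PySem.Chars.lower, List.map_take, List.map_drop]
  rw [List.prefix_iff_eq_take, show ("atg".toList).length = 3 by decide]
  exact eq_comm

-- ===== VERDICT (by name: the statement is the Claim_ definition above) =====
theorem find_start_codon_spec : Claim_equal_find_start_codon := by
  intro dna frame _ hpre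
  unfold Spec_find_start_codon find_start_codon find_start_codon_alt
  simp only []
  rw [PySem.List.foldl_append_ite_eq_filter
        (fun i => PySem.Str.lower (PySem.Str.slice dna (some i) (some (i + 3))) = "atg"),
      List.nil_append,
      ← PySem.Chars.findFrom_zero, show (0 : Int) = ((0 : Nat) : Int) by rfl,
      fscLoop_spec _ frame _ 0 [] (by omega) (by omega), List.nil_append]
  have hlen : ((PySem.Str.lower dna).toList).length = dna.toList.length := by
    rw [PySem.Str.toList_lower]; simp [PySem.Chars.lower]
  apply eq_of_pairwise_lt_of_mem_iff
  · apply List.Pairwise.filter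
    rw [PySem.List.pyRange_of_pos _ _ (by norm_num : (0:Int) < 3)]
    exact List.pairwise_lt_range.map _ (by intro a b hab; omega)
  · exact ((pairwise_occFrom _ 0).filter _).map _ (by intro a b hab; omega)
  · intro x
    rw [List.mem_filter, PySem.List.mem_pyRange_iff_of_pos (by norm_num : (0:Int) < 3)]
    simp only [List.mem_map, List.mem_filter, mem_occFrom, decide_eq_true_eq,
      PySem.Int.mod_eq_zero_iff_dvd, PySem.Str.len_eq]
    constructor
    · rintro ⟨⟨hfx, hxn, hdvd⟩, hP⟩
      have hx0 : 0 ≤ x := le_trans hpre hfx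
      refine ⟨x.toNat, ⟨⟨by omega, by omega, ?_⟩, by omega, by
        rw [show ((x.toNat : Nat) : Int) = x by omega]; exact hdvd⟩, by omega⟩
      exact (codon_iff dna x hx0).1 hP
    · rintro ⟨j, ⟨⟨hjn, _, hjpfx⟩, hfj, hdvd⟩, rfl⟩
      refine ⟨⟨hfj, by omega, hdvd⟩, ?_⟩
      exact (codon_iff dna (j : Int) (by omega)).2 (by rw [Int.toNat_natCast]; exact hjpfx)
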